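-- pv_equiv track=rewrite | github.com/Lycc42/Denum | Denum_python_package/Denum_simplel.py | elastic_decoder
-- ===== SOURCE A (Python) =====
-- def zigzag_decoder(num: int):
--     return (num >> 1) ^ -(num & 1)
--
-- def elastic_decoder(num_bytes):
--     ret = 0
--     offset = 0
--     for i in range(len(num_bytes)):
--         cur = num_bytes[i]
--         ret |= ((cur & 0x7f) << offset)
--         if cur & 0x80 == 0:
--             break
--         offset += 7
--     return zigzag_decoder(ret)
-- ===== SOURCE B (Python) =====
-- def elastic_decoder(num_bytes):
--     # find the index just past the first terminating byte (high bit clear);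
--     # if none, consume the whole list
--     end = len(num_bytes)
--     for i, b in enumerate(num_bytes):
--         if b & 0x80 == 0:
--             end = i + 1
--             break
--     chunks = [b & 0x7f for b in num_bytes[:end]]
--     ret = 0
--     for c in reversed(chunks):
--         ret = (ret << 7) | c
--     return (ret >> 1) ^ -(ret & 1)
-- ===== Notes on version B (the rewrite author's own statement) =====
-- stated objective: alternative
-- what changed: B first locates the terminating byte, extracts the 7-bit chunks of that prefix, and rebuilds the value by a most-significant-first reverse fold of shift-or, instead of A's single pass that ORs each chunk into place at a running bit offset.
import Mathlib
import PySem

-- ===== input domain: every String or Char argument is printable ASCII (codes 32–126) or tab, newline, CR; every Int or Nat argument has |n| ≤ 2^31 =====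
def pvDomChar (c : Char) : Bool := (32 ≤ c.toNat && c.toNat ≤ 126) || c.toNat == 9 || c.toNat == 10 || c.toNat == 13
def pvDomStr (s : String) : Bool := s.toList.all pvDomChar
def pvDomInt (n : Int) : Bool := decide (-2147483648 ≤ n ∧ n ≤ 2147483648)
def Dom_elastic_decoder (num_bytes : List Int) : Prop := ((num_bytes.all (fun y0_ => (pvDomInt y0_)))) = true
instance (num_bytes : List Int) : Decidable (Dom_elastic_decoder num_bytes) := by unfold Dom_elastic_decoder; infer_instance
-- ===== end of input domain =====

-- B re-decomposes A's single shift-or accumulation pass into: locate the terminator, mask out the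
-- 7-bit chunks of that prefix, then rebuild the value most-significant-first by a reverse fold
-- (objective: alternative decomposition, same O(n) cost).

-- ===== PORT A =====
def zigzag_decoder (num : Int) : Int :=
  PySem.Int.bxor (num >>> 1) (-(PySem.Int.band num 1))

-- the for-loop of A: state (ret, offset); breaks when the high bit is clear
def elastic_decoder_loop : List Int → Int → Nat → Int
  | [], ret, _ => ret
  | cur :: rest, ret, offset =>
    let ret' := PySem.Int.bor ret (PySem.Int.band cur 127 <<< offset)
    if PySem.Int.band cur 128 = 0 then ret'
    else elastic_decoder_loop rest ret' (offset + 7)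

def elastic_decoder (num_bytes : List Int) : Int :=
  zigzag_decoder (elastic_decoder_loop num_bytes 0 0)

-- ===== PORT B =====
-- B's scan for `end`: index just past the first byte with high bit clear, else the full length
def elastic_decoder_alt_end : List Int → Nat
  | [] => 0
  | b :: rest => if PySem.Int.band b 128 = 0 then 1 else 1 + elastic_decoder_alt_end rest

def elastic_decoder_alt (num_bytes : List Int) : Int :=
  let e := elastic_decoder_alt_end num_bytes
  let chunks := (num_bytes.take e).map (fun b => PySem.Int.band b 127)
  let ret := chunks.reverse.foldl (fun r c => PySem.Int.bor (r <<< (7:Nat)) c) 0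
  PySem.Int.bxor (ret >>> 1) (-(PySem.Int.band ret 1))

-- ===== PRECONDITION & SPEC =====
def Spec_elastic_decoder (num_bytes : List Int) (out : Int) : Prop := out = elastic_decoder_alt num_bytes
instance (num_bytes : List Int) (out : Int) : Decidable (Spec_elastic_decoder num_bytes out) := by unfold Spec_elastic_decoder; infer_instance

-- ===== CLAIM (what is proved, stated in full; the proofs are below) =====
def Claim_equal_elastic_decoder : Prop := ∀ (num_bytes : List Int), Dom_elastic_decoder num_bytes → Spec_elastic_decoder num_bytes (elastic_decoder num_bytes)

-- ===== LEMMAS AND PROOFS =====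

-- common reference value: the base-128 number spelled by the 7-bit chunks up to the terminator
def pvVal : List Int → Int
  | [] => 0
  | b :: rest =>
    if PySem.Int.band b 128 = 0 then PySem.Int.band b 127
    else PySem.Int.band b 127 + 128 * pvVal rest

theorem pvChunk_bounds (b : Int) : 0 ≤ PySem.Int.band b 127 ∧ PySem.Int.band b 127 < 128 := by
  by_cases hb : 0 ≤ b
  · rw [PySem.Int.band_of_nonneg hb (by norm_num)]
    refine ⟨by positivity, ?_⟩
    have h : b.toNat &&& (127 : Int).toNat < 2 ^ 7 := Nat.and_lt_two_pow _ (by norm_num)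
    exact_mod_cast h
  · rw [PySem.Int.band]
    simp only [if_neg (by omega : ¬ (0:Int) ≤ b), if_pos (by norm_num : (0:Int) ≤ 127)]
    refine ⟨by positivity, ?_⟩
    have hle : ((127 : Int).toNat - ((127 : Int).toNat &&& (-b - 1).toNat) : Nat) ≤ 127 :=
      Nat.sub_le _ _
    exact_mod_cast Nat.lt_succ_of_le hle

theorem pvVal_nonneg (l : List Int) : 0 ≤ pvVal l := by
  induction l with
  | nil => simp [pvVal]
  | cons b rest ih =>
    have hb := (pvChunk_bounds b).1
    by_cases h : PySem.Int.band b 128 = 0 <;> simp [pvVal, h] <;> omega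

theorem pvNatLorShift (a b k : Nat) (h : a < 2 ^ k) : a ||| (b <<< k) = a + b * 2 ^ k := by
  apply Nat.eq_of_testBit_eq
  intro i
  rw [Nat.testBit_lor, Nat.testBit_shiftLeft]
  by_cases hik : i < k
  · have hmod : (a + b * 2 ^ k) % 2 ^ k = a := by
      rw [Nat.add_mul_mod_self_right, Nat.mod_eq_of_lt h]
    have ht : Nat.testBit a i = Nat.testBit (a + b * 2 ^ k) i := by
      conv_lhs => rw [← hmod]
      rw [Nat.testBit_mod_two_pow]
      simp [hik]
    rw [← ht]
    simp [show ¬ (i ≥ k) by omega]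
  · have hk : k ≤ i := Nat.le_of_not_lt hik
    have hA : Nat.testBit a i = false :=
      Nat.testBit_lt_two_pow (lt_of_lt_of_le h (Nat.pow_le_pow_right (by norm_num) hk))
    have hdiv : (a + b * 2 ^ k) >>> k = b := by
      rw [Nat.shiftRight_eq_div_pow, Nat.add_mul_div_right _ _ (Nat.two_pow_pos k),
        Nat.div_eq_of_lt h, Nat.zero_add]
    have ht : Nat.testBit (a + b * 2 ^ k) i = Nat.testBit b (i - k) := by
      conv_lhs => rw [show i = k + (i - k) by omega]
      rw [← Nat.testBit_shiftRight, hdiv]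
    rw [ht, hA]
    simp [hk]

theorem pvBorShift (a b : Int) (k : Nat) (ha : 0 ≤ a) (hb : 0 ≤ b) (h : a < 2 ^ k) :
    PySem.Int.bor a (b <<< k) = a + b * 2 ^ k := by
  rw [Int.shiftLeft_eq]
  have hbn : (0:Int) ≤ b * 2 ^ k := by positivity
  rw [PySem.Int.bor_of_nonneg ha hbn]
  have hshape : b * 2 ^ k = ((b.toNat <<< k : Nat) : Int) := by
    rw [Nat.shiftLeft_eq]
    push_cast [Int.toNat_of_nonneg hb]
    ring
  have hma : a.toNat < 2 ^ k := by
    have h' : ((a.toNat : Int)) < ((2 ^ k : Nat) : Int) := by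
      rw [Int.toNat_of_nonneg ha]; exact_mod_cast h
    exact_mod_cast h'
  rw [hshape, Int.toNat_natCast, pvNatLorShift a.toNat b.toNat k hma]
  push_cast [Int.toNat_of_nonneg ha, Int.toNat_of_nonneg hb]
  rw [Int.shiftLeft_eq]

theorem pvLoopA (l : List Int) : ∀ (ret : Int) (k : Nat), 0 ≤ ret → ret < 2 ^ k →
    elastic_decoder_loop l ret k = ret + pvVal l * 2 ^ k := by
  induction l with
  | nil => intro ret k _ _; simp [elastic_decoder_loop, pvVal]
  | cons cur rest ih =>
    intro ret k h0 h1
    obtain ⟨hc0, hc1⟩ := pvChunk_bounds cur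
    have h2k : (0:Int) < 2 ^ k := by positivity
    have hbor : PySem.Int.bor ret (PySem.Int.band cur 127 <<< k)
        = ret + PySem.Int.band cur 127 * 2 ^ k := pvBorShift _ _ _ h0 hc0 h1
    by_cases hterm : PySem.Int.band cur 128 = 0
    · simp [elastic_decoder_loop, hterm, pvVal, hbor]
    · have h0' : 0 ≤ ret + PySem.Int.band cur 127 * 2 ^ k := by
        have := mul_nonneg hc0 h2k.le; linarith
      have hlt : ret + PySem.Int.band cur 127 * 2 ^ k < 2 ^ (k + 7) := by
        have hp : (2:Int) ^ (k + 7) = 2 ^ k * 128 := by rw [pow_add]; norm_num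
        nlinarith
      have hrec := ih (ret + PySem.Int.band cur 127 * 2 ^ k) (k + 7) h0' hlt
      simp only [elastic_decoder_loop, hbor, if_neg hterm, hrec, pvVal]
      rw [pow_add]
      ring

theorem pvFoldB (l : List Int) :
    ((l.take (elastic_decoder_alt_end l)).map (fun b => PySem.Int.band b 127)).reverse.foldl
      (fun r c => PySem.Int.bor (r <<< (7:Nat)) c) 0 = pvVal l := by
  induction l with
  | nil => simp [elastic_decoder_alt_end, pvVal]
  | cons b rest ih =>
    obtain ⟨hc0, hc1⟩ := pvChunk_bounds b
    by_cases hb : PySem.Int.band b 128 = 0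
    · simp only [elastic_decoder_alt_end, if_pos hb, pvVal, List.take_succ_cons,
        List.take_zero, List.map_cons, List.map_nil, List.reverse_cons, List.reverse_nil,
        List.nil_append, List.foldl_cons, List.foldl_nil]
      rw [PySem.Int.bor_comm,
        pvBorShift (PySem.Int.band b 127) 0 7 hc0 (by norm_num) (by simpa using hc1)]
      norm_num
    · simp only [elastic_decoder_alt_end, if_neg hb, pvVal]
      have htake : (1 + elastic_decoder_alt_end rest) = (elastic_decoder_alt_end rest) + 1 := by omega
      rw [htake]
      simp only [List.take_succ_cons, List.map_cons, List.reverse_cons, List.foldl_append,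
        List.foldl_cons, List.foldl_nil, ih]
      rw [PySem.Int.bor_comm,
        pvBorShift (PySem.Int.band b 127) (pvVal rest) 7 hc0 (pvVal_nonneg rest) (by simpa using hc1)]
      ring

theorem pvMain (l : List Int) : elastic_decoder l = elastic_decoder_alt l := by
  simp only [elastic_decoder, elastic_decoder_alt, zigzag_decoder]
  rw [pvLoopA l 0 0 le_rfl (by norm_num), pvFoldB]
  norm_num

-- ===== VERDICT (by name: the statement is the Claim_ definition above) =====
theorem elastic_decoder_spec : Claim_equal_elastic_decoder := by
  intro l _
  unfold Spec_elastic_decoder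
  exact pvMain l
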